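-- pv_equiv track=rewrite | github.com/vanbako/xzre-ghidra | scripts/postprocess_register_temps.py | _uppercase_bool_literals
-- ===== SOURCE A (Python) =====
-- from typing import Dict, List, Tuple
--
-- def _uppercase_bool_literals(text: str) -> Tuple[str, int]:
--     result: List[str] = []
--     length = len(text)
--     i = 0
--     state = "code"
--     replacements = 0
--
--     def is_ident_char(ch: str) -> bool:
--         return ch == "_" or ch.isalnum()
--
--     while i < length:
--         ch = text[i]
--         if state == "code":
--             if ch == "/" and i + 1 < length:
--                 nxt = text[i + 1]
--                 if nxt == "/":
--                     result.append("//")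
--                     state = "line_comment"
--                     i += 2
--                     continue
--                 if nxt == "*":
--                     result.append("/*")
--                     state = "block_comment"
--                     i += 2
--                     continue
--             if ch == '"':
--                 result.append(ch)
--                 state = "string"
--                 i += 1
--                 continue
--             if ch == "'":
--                 result.append(ch)
--                 state = "char"
--                 i += 1
--                 continue
--             if ch == "_" or ch.isalpha():
--                 j = i + 1
--                 while j < length and is_ident_char(text[j]):
--                     j += 1
--                 token = text[i:j]
--                 if token == "true":
--                     result.append("TRUE")
--                     replacements += 1
--                 elif token == "false":
--                     result.append("FALSE")
--                     replacements += 1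
--                 else:
--                     result.append(token)
--                 i = j
--                 continue
--             result.append(ch)
--             i += 1
--             continue
--
--         if state == "string":
--             result.append(ch)
--             i += 1
--             if ch == "\\" and i < length:
--                 result.append(text[i])
--                 i += 1
--             elif ch == '"':
--                 state = "code"
--             continue
--
--         if state == "char":
--             result.append(ch)
--             i += 1
--             if ch == "\\" and i < length:
--                 result.append(text[i])
--                 i += 1
--             elif ch == "'":
--                 state = "code"
--             continue
--
--         if state == "line_comment":
--             result.append(ch)
--             i += 1
--             if ch == "\n":
--                 state = "code"
--             continue
--
--         if state == "block_comment":
--             result.append(ch)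
--             i += 1
--             if ch == "*" and i < length and text[i] == "/":
--                 result.append("/")
--                 i += 1
--                 state = "code"
--             continue
--
--     return "".join(result), replacements
-- ===== SOURCE B (Python) =====
-- from typing import Tuple
--
-- def _uppercase_bool_literals(text: str) -> Tuple[str, int]:
--     # Token-at-a-time scanner: each step consumes a whole token (comment,
--     # string/char literal, identifier, or single char) using find/slices,
--     # instead of a char-by-char state machine.
--     out = []
--     count = 0
--     n = len(text)
--     i = 0
--     while i < n:
--         ch = text[i]
--         if text.startswith("//", i):
--             j = text.find("\n", i)
--             j = n if j == -1 else j + 1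
--             out.append(text[i:j])
--             i = j
--         elif text.startswith("/*", i):
--             j = text.find("*/", i + 2)
--             j = n if j == -1 else j + 2
--             out.append(text[i:j])
--             i = j
--         elif ch == '"' or ch == "'":
--             j = i + 1
--             while j < n and text[j] != ch:
--                 j += 2 if text[j] == "\\" else 1
--             j = min(j + 1, n)
--             out.append(text[i:j])
--             i = j
--         elif ch == "_" or ch.isalpha():
--             j = i + 1
--             while j < n and (text[j] == "_" or text[j].isalnum()):
--                 j += 1
--             tok = text[i:j]
--             if tok in ("true", "false"):
--                 out.append(tok.upper())
--                 count += 1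
--             else:
--                 out.append(tok)
--             i = j
--         else:
--             out.append(ch)
--             i += 1
--     return "".join(out), count
-- ===== Notes on version B (the rewrite author's own statement) =====
-- stated objective: simpler
-- what changed: Replaced A's char-by-char five-state machine (a `state` variable updated per character) with a stateless token-at-a-time scanner that consumes a whole comment, string/char literal, identifier or single character per step using startswith/find/slices.
import Mathlib
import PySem

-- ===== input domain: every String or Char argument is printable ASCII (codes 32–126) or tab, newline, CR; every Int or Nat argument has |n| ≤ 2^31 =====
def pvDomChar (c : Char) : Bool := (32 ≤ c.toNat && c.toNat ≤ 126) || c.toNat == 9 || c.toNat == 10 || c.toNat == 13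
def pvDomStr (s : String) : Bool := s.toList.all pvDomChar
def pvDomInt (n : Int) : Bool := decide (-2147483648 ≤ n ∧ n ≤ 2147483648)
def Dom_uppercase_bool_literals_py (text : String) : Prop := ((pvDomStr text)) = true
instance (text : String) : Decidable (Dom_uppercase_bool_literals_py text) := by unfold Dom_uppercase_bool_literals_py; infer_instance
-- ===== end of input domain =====

-- B replaces A's char-by-char five-state machine with a token-at-a-time scanner
-- (whole comments / string literals / identifiers consumed per step); objective: simpler.

-- ===== PORT A =====
-- Python str.isalpha/str.isalnum: exact on the printable-ASCII domain (Char.isAlpha/.isAlphanum are ASCII-only).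
def pvIsIdentChar (c : Char) : Bool := c == '_' || c.isAlphanum

-- A's inner `while j < length and is_ident_char(text[j]): j += 1` span.
def pvIdentSpan : List Char → List Char × List Char
  | [] => ([], [])
  | c :: cs =>
    if pvIsIdentChar c then
      let (t, r) := pvIdentSpan cs
      (c :: t, r)
    else ([], c :: cs)

theorem pvIdentSpan_snd_length_le (cs : List Char) : (pvIdentSpan cs).2.length ≤ cs.length := by
  induction cs with
  | nil => simp [pvIdentSpan]
  | cons c cs ih =>
    simp only [pvIdentSpan]
    split <;> simp <;> omega

inductive PvAState where
  | code | strS | chrS | lineC | blockC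
deriving DecidableEq, Repr

-- A's while-loop with its `state` variable, one constructor per state; the
-- `result` list of appended pieces becomes the forward-built output list.
def pvLoopA : PvAState → List Char → List Char × Int
  | _, [] => ([], 0)
  | .code, '/' :: '/' :: r =>
    let oc := pvLoopA .lineC r
    ('/' :: '/' :: oc.1, oc.2)
  | .code, '/' :: '*' :: r =>
    let oc := pvLoopA .blockC r
    ('/' :: '*' :: oc.1, oc.2)
  | .code, ch :: rest =>
    if ch = '"' then
      let oc := pvLoopA .strS rest
      (ch :: oc.1, oc.2)
    else if ch = '\'' then
      let oc := pvLoopA .chrS rest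
      (ch :: oc.1, oc.2)
    else if ch = '_' || ch.isAlpha then
      let tok := ch :: (pvIdentSpan rest).1
      let oc := pvLoopA .code (pvIdentSpan rest).2
      if tok = ['t','r','u','e'] then ('T' :: 'R' :: 'U' :: 'E' :: oc.1, oc.2 + 1)
      else if tok = ['f','a','l','s','e'] then ('F' :: 'A' :: 'L' :: 'S' :: 'E' :: oc.1, oc.2 + 1)
      else (tok ++ oc.1, oc.2)
    else
      let oc := pvLoopA .code rest
      (ch :: oc.1, oc.2)
  | .strS, '\\' :: d :: r =>
    let oc := pvLoopA .strS r
    ('\\' :: d :: oc.1, oc.2)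
  | .strS, ch :: rest =>
    if ch = '"' then
      let oc := pvLoopA .code rest
      (ch :: oc.1, oc.2)
    else
      let oc := pvLoopA .strS rest
      (ch :: oc.1, oc.2)
  | .chrS, '\\' :: d :: r =>
    let oc := pvLoopA .chrS r
    ('\\' :: d :: oc.1, oc.2)
  | .chrS, ch :: rest =>
    if ch = '\'' then
      let oc := pvLoopA .code rest
      (ch :: oc.1, oc.2)
    else
      let oc := pvLoopA .chrS rest
      (ch :: oc.1, oc.2)
  | .lineC, ch :: rest =>
    if ch = '\n' then
      let oc := pvLoopA .code rest
      (ch :: oc.1, oc.2)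
    else
      let oc := pvLoopA .lineC rest
      (ch :: oc.1, oc.2)
  | .blockC, '*' :: '/' :: r =>
    let oc := pvLoopA .code r
    ('*' :: '/' :: oc.1, oc.2)
  | .blockC, ch :: rest =>
    let oc := pvLoopA .blockC rest
    (ch :: oc.1, oc.2)
termination_by _ cs => cs.length
decreasing_by all_goals simp_all <;> first
  | omega
  | (have := pvIdentSpan_snd_length_le rest; omega)

def uppercase_bool_literals_py (text : String) : String × Int :=
  let (o, c) := pvLoopA .code text.toList
  (String.ofList o, c)

-- ===== PORT B =====
-- B's `while j < n: j += 2 if backslash else 1` quote scan: consumed chars (incl. closing quote) and rest.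
def pvScanStr (q : Char) : List Char → List Char × List Char
  | [] => ([], [])
  | c :: cs =>
    if c = q then ([c], cs)
    else if c = '\\' then
      match cs with
      | [] => ([c], [])
      | d :: cs' =>
        let (t, r) := pvScanStr q cs'
        (c :: d :: t, r)
    else
      let (t, r) := pvScanStr q cs
      (c :: t, r)

-- B's `text.find("*/", i+2)` + slice: chars up to and including the first "*/" (all if absent), and rest.
def pvScanBlock : List Char → List Char × List Char
  | [] => ([], [])
  | '*' :: '/' :: cs => (['*', '/'], cs)
  | c :: cs =>
    let (t, r) := pvScanBlock cs
    (c :: t, r)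

theorem pvScanStr_snd_length_le (q : Char) (cs : List Char) : (pvScanStr q cs).2.length ≤ cs.length := by
  fun_induction pvScanStr q cs <;> simp_all <;> omega

theorem pvScanBlock_snd_length_le (cs : List Char) : (pvScanBlock cs).2.length ≤ cs.length := by
  fun_induction pvScanBlock cs <;> simp_all <;> omega

-- B's main loop: one whole token consumed per step.
def pvLoopB : List Char → List Char × Int
  | [] => ([], 0)
  | '/' :: '/' :: rest =>
    (match h : rest.dropWhile (· ≠ '\n') with
     | [] => ('/' :: '/' :: rest.takeWhile (· ≠ '\n'), 0)
     | _ :: r' =>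
       let oc := pvLoopB r'
       ('/' :: '/' :: (rest.takeWhile (· ≠ '\n') ++ '\n' :: oc.1), oc.2))
  | '/' :: '*' :: rest =>
    let oc := pvLoopB (pvScanBlock rest).2
    ('/' :: '*' :: ((pvScanBlock rest).1 ++ oc.1), oc.2)
  | ch :: rest =>
    if ch = '"' || ch = '\'' then
      let oc := pvLoopB (pvScanStr ch rest).2
      (ch :: ((pvScanStr ch rest).1 ++ oc.1), oc.2)
    else if ch = '_' || ch.isAlpha then
      let tok := ch :: rest.takeWhile pvIsIdentChar
      let oc := pvLoopB (rest.dropWhile pvIsIdentChar)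
      if tok = ['t','r','u','e'] || tok = ['f','a','l','s','e'] then
        (tok.map Char.toUpper ++ oc.1, oc.2 + 1)
      else (tok ++ oc.1, oc.2)
    else
      let oc := pvLoopB rest
      (ch :: oc.1, oc.2)
termination_by cs => cs.length
decreasing_by
  · have h1 := rest.length_dropWhile_le (p := (· ≠ '\n')); simp_all; omega
  · have h1 := pvScanBlock_snd_length_le rest; simp; omega
  · have h1 := pvScanStr_snd_length_le ch rest; simp; omega
  · have h1 := rest.length_dropWhile_le (p := pvIsIdentChar); simp; omega
  · simp

def uppercase_bool_literals_py_alt (text : String) : String × Int :=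
  let (o, c) := pvLoopB text.toList
  (String.ofList o, c)

-- ===== PRECONDITION & SPEC =====
def Spec_uppercase_bool_literals_py (text : String) (out : String × Int) : Prop := out = uppercase_bool_literals_py_alt text
instance (text : String) (out : String × Int) : Decidable (Spec_uppercase_bool_literals_py text out) := by unfold Spec_uppercase_bool_literals_py; infer_instance

-- ===== CLAIM (what is proved, stated in full; the proofs are below) =====
def Claim_equal_uppercase_bool_literals_py : Prop := ∀ (text : String), Dom_uppercase_bool_literals_py text → Spec_uppercase_bool_literals_py text (uppercase_bool_literals_py text)

-- ===== LEMMAS AND PROOFS =====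

theorem pvIdentSpan_eq (cs : List Char) :
    pvIdentSpan cs = (cs.takeWhile pvIsIdentChar, cs.dropWhile pvIsIdentChar) := by
  induction cs with
  | nil => simp [pvIdentSpan]
  | cons c cs ih =>
    simp only [pvIdentSpan, List.takeWhile_cons, List.dropWhile_cons]
    cases h : pvIsIdentChar c <;> simp [h, ih]

theorem pvLoopA_lineC (cs : List Char) :
    pvLoopA .lineC cs =
      (match cs.dropWhile (· ≠ '\n') with
       | [] => (cs.takeWhile (· ≠ '\n'), (0 : Int))
       | _ :: r => (cs.takeWhile (· ≠ '\n') ++ '\n' :: (pvLoopA .code r).1, (pvLoopA .code r).2)) := by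
  induction cs with
  | nil => simp [pvLoopA]
  | cons c cs ih =>
    by_cases hc : c = '\n'
    · subst hc; simp [pvLoopA]
    · simp only [pvLoopA, if_neg hc, ih, List.takeWhile_cons, List.dropWhile_cons]

      cases h : cs.dropWhile (· ≠ '\n') with
      | nil => simp [hc]
      | cons x r => simp [hc]

theorem pvLoopA_blockC (cs : List Char) :
    pvLoopA .blockC cs =
      ((pvScanBlock cs).1 ++ (pvLoopA .code (pvScanBlock cs).2).1,
       (pvLoopA .code (pvScanBlock cs).2).2) := by
  fun_induction pvScanBlock cs with
  | case1 => simp [pvLoopA]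
  | case2 => simp [pvLoopA]
  | case3 c cs hno t r hsb ih => simp_all [pvLoopA]

theorem pvLoopA_strS (cs : List Char) :
    pvLoopA .strS cs =
      ((pvScanStr '"' cs).1 ++ (pvLoopA .code (pvScanStr '"' cs).2).1,
       (pvLoopA .code (pvScanStr '"' cs).2).2) := by
  fun_induction pvScanStr '"' cs <;> simp_all [pvLoopA]

theorem pvLoopA_chrS (cs : List Char) :
    pvLoopA .chrS cs =
      ((pvScanStr '\'' cs).1 ++ (pvLoopA .code (pvScanStr '\'' cs).2).1,
       (pvLoopA .code (pvScanStr '\'' cs).2).2) := by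
  fun_induction pvScanStr '\'' cs <;> simp_all [pvLoopA]

theorem pvMapUpperTrue : ['t','r','u','e'].map Char.toUpper = ['T','R','U','E'] := by decide
theorem pvMapUpperFalse : ['f','a','l','s','e'].map Char.toUpper = ['F','A','L','S','E'] := by decide

theorem pvLoopA_code_eq_loopB (cs : List Char) : pvLoopA .code cs = pvLoopB cs := by
  fun_induction pvLoopB cs with
  | case1 => simp [pvLoopA]
  | case2 rest h =>
    simp only [ne_eq, decide_not] at h
    simp [pvLoopA, pvLoopA_lineC, h]
  | case3 rest x r h ih ih1 =>
    simp only [pvLoopA, pvLoopA_lineC, h, ih1]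
    rfl
  | case4 rest ih ih1 =>
    simp only [pvLoopA, pvLoopA_blockC, ih1]
    rfl
  | case5 ch rest hno1 hno2 hq ih ih1 =>
    simp only [Bool.or_eq_true, decide_eq_true_eq] at hq
    rcases hq with hq | hq <;> subst hq <;>
      (simp only [pvLoopA, pvLoopA_strS, pvLoopA_chrS, ih1, reduceIte]; rfl)
  | case6 ch rest hno1 hno2 hq hid htf ih h ih1 =>
    simp only [Bool.or_eq_true, decide_eq_true_eq] at h
    have h' : ch :: List.takeWhile pvIsIdentChar rest = ['t','r','u','e'] ∨
        ch :: List.takeWhile pvIsIdentChar rest = ['f','a','l','s','e'] := h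
    have hhtf : htf = ch :: List.takeWhile pvIsIdentChar rest := rfl
    rcases h' with h' | h' <;>
      obtain ⟨hc, h2⟩ := List.cons_eq_cons.mp h' <;> subst hc <;>
      simp only [hhtf, h2, pvLoopA, pvIdentSpan_eq, ih1, pvMapUpperTrue, pvMapUpperFalse,
        reduceIte, List.cons_append, List.nil_append] <;> rfl
  | case7 ch rest hno1 hno2 hq hid htf ih h ih1 =>
    simp only [Bool.or_eq_true, decide_eq_true_eq, not_or] at h hq
    simp only [pvLoopA, pvIdentSpan_eq]
    rw [if_neg hq.1, if_neg hq.2, if_pos hid, if_neg h.1, if_neg h.2, ih1]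
  | case8 ch rest hno1 hno2 hq hid ih ih1 =>
    simp only [Bool.or_eq_true, decide_eq_true_eq, not_or] at hq
    simp only [pvLoopA]
    rw [if_neg hq.1, if_neg hq.2, if_neg hid, ih1]

-- ===== VERDICT (by name: the statement is the Claim_ definition above) =====
theorem uppercase_bool_literals_py_spec : Claim_equal_uppercase_bool_literals_py := by
  intro text _
  unfold Spec_uppercase_bool_literals_py uppercase_bool_literals_py uppercase_bool_literals_py_alt
  rw [pvLoopA_code_eq_loopB]
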